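-- pv_equiv track=rewrite | github.com/boschresearch/ecod | ecod/cluster/sweep.py | get_params_list
-- ===== SOURCE A (Python) =====
-- def get_param_str(key, val):
--     if val is True:
--         return f"{key}"
--     elif val is False:
--         return ""
--     else:
--         return f"{key} {val}"
--
-- def append_params_str(params_str, key, val):
--     param = get_param_str(key, val)
--     if len(param) > 0:
--         params_str = params_str + " " + param
--     return params_str
--
-- def get_params_list(params):
--     params_list = [""]
--     for key, value in params.items():
--         if not isinstance(value, str) and hasattr(value, "__len__"):
--             params_list_add = []
--             for pp in params_list:
--                 for val in value:
--                     params_str = append_params_str(pp, key, val)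
--                     params_list_add.append(params_str)
--             params_list = params_list_add
--         else:
--             for ii, pp in enumerate(params_list):
--                 params_list[ii] = append_params_str(pp, key, value)
--     return params_list
-- ===== SOURCE B (Python) =====
-- def get_param_str(key, val):
--     if val is True:
--         return f"{key}"
--     elif val is False:
--         return ""
--     else:
--         return f"{key} {val}"
--
--
-- def _product(option_lists):
--     """All combinations of one fragment per key, last key varying fastest."""
--     if not option_lists:
--         yield []
--         return
--     head = option_lists[0]
--     rest = option_lists[1:]
--     for frag in head:
--         for tail in _product(rest):
--             yield [frag] + tail
--
--
-- def get_params_list(params):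
--     option_lists = []
--     for key, value in params.items():
--         if not isinstance(value, str) and hasattr(value, "__len__"):
--             option_lists.append([get_param_str(key, val) for val in value])
--         else:
--             option_lists.append([get_param_str(key, value)])
--     result = []
--     for combo in _product(option_lists):
--         s = ""
--         for frag in combo:
--             if frag:
--                 s = s + " " + frag
--         result.append(s)
--     return result
-- ===== Notes on version B (the rewrite author's own statement) =====
-- stated objective: idiomatic
-- what changed: Replaces A's incremental accumulate-and-branch expansion of the result list with a per-key fragment table followed by a recursive cartesian product and a final join pass over each combination.
import Mathlib
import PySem

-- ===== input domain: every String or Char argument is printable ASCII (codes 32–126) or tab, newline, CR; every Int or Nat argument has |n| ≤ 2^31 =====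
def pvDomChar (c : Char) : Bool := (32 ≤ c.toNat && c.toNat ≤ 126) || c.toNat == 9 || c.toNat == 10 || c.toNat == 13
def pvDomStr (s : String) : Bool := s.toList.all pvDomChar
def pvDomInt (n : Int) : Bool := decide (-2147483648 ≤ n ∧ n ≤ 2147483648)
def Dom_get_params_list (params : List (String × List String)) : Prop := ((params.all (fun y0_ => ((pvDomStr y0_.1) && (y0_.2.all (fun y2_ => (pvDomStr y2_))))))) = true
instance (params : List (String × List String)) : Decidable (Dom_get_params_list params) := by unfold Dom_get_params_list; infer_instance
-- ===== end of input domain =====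

-- B replaces A's incremental accumulate-and-branch expansion by a per-key fragment
-- table followed by a recursive cartesian product and a join pass (idiomatic decomposition).


-- ===== PORT A =====
-- At this type every value is a List String, so Python's `val is True/False` tests are
-- always False and the list-valued branch of the outer loop is always taken.
def pvGetParamStr (key val : String) : String := key ++ " " ++ val

def pvAppendParamsStr (params_str key val : String) : String :=
  let param := pvGetParamStr key val
  if param.length > 0 then params_str ++ " " ++ param else params_str

def get_params_list (params : List (String × List String)) : List String :=
  params.foldl
    (fun params_list kv =>
      params_list.foldl
        (fun add pp =>
          kv.2.foldl (fun add val => add ++ [pvAppendParamsStr pp kv.1 val]) add)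
        [])
    [""]

-- ===== PORT B =====
-- `pvProduct` is Source B's `_product`: cartesian product, last key varying fastest.
def pvProduct : List (List String) → List (List String)
  | [] => [[]]
  | head :: rest => head.flatMap (fun frag => (pvProduct rest).map (fun tail => frag :: tail))

def get_params_list_alt (params : List (String × List String)) : List String :=
  let optionLists := params.map (fun kv => kv.2.map (fun val => pvGetParamStr kv.1 val))
  (pvProduct optionLists).map
    (fun combo => combo.foldl (fun s frag => if frag.length > 0 then s ++ " " ++ frag else s) "")

-- ===== PRECONDITION & SPEC =====
def Spec_get_params_list (params : List (String × List String)) (out : List String) : Prop := out = get_params_list_alt params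
instance (params : List (String × List String)) (out : List String) : Decidable (Spec_get_params_list params out) := by unfold Spec_get_params_list; infer_instance

-- ===== CLAIM (what is proved, stated in full; the proofs are below) =====
def Claim_equal_get_params_list : Prop := ∀ (params : List (String × List String)), Dom_get_params_list params → Spec_get_params_list params (get_params_list params)

-- ===== LEMMAS AND PROOFS =====

theorem pvFrag_len (k v : String) : (pvGetParamStr k v).length > 0 := by
  simp [pvGetParamStr, String.length_append]
  exact Or.inl (Or.inr (by decide))

theorem pvAppend_eq (ps k v : String) :
    pvAppendParamsStr ps k v = ps ++ " " ++ pvGetParamStr k v := by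
  simp [pvAppendParamsStr, pvFrag_len k v]

-- the inner fold over the values appends one fragment per value
theorem inner_fold (k : String) (vs : List String) (acc : List String) (pp : String) :
    vs.foldl (fun add val => add ++ [pvAppendParamsStr pp k val]) acc
      = acc ++ vs.map (fun v => pp ++ " " ++ pvGetParamStr k v) := by
  induction vs generalizing acc with
  | nil => simp
  | cons v vs ih => rw [List.foldl_cons, ih]; simp [pvAppend_eq]

-- one pass of A's outer loop over the accumulated strings is a flatMap
theorem middle_fold (k : String) (vs : List String) (plist acc : List String) :
    plist.foldl
        (fun add pp => vs.foldl (fun add val => add ++ [pvAppendParamsStr pp k val]) add) acc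
      = acc ++ plist.flatMap (fun pp => vs.map (fun v => pp ++ " " ++ pvGetParamStr k v)) := by
  induction plist generalizing acc with
  | nil => simp
  | cons pp ps ih => rw [List.foldl_cons, ih, inner_fold]; simp

theorem join_step (x : String) (hx : x.length > 0) (pp : String) (c : List String) :
    (x :: c).foldl (fun s frag => if frag.length > 0 then s ++ " " ++ frag else s) pp
      = c.foldl (fun s frag => if frag.length > 0 then s ++ " " ++ frag else s) (pp ++ " " ++ x) := by
  simp [List.foldl, hx]

-- main invariant: A's fold from any accumulator L equals mapping B's join over the product
theorem main_inv (params : List (String × List String)) (L : List String) :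
    params.foldl
        (fun params_list kv =>
          params_list.foldl
            (fun add pp => kv.2.foldl (fun add val => add ++ [pvAppendParamsStr pp kv.1 val]) add)
            [])
        L
      = L.flatMap (fun pp =>
          (pvProduct (params.map (fun kv => kv.2.map (fun val => pvGetParamStr kv.1 val)))).map
            (fun combo =>
              combo.foldl (fun s frag => if frag.length > 0 then s ++ " " ++ frag else s) pp)) := by
  induction params generalizing L with
  | nil => simp [pvProduct]
  | cons kv rest ih =>
      rw [List.foldl_cons, middle_fold, List.nil_append, ih]
      simp only [pvProduct, List.map_cons, List.flatMap_assoc, List.map_flatMap, List.flatMap_map]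
      refine List.flatMap_congr ?_
      intro pp _
      refine List.flatMap_congr ?_
      intro v _
      rw [List.map_map]
      refine List.map_congr_left ?_
      intro c _
      exact (join_step _ (pvFrag_len kv.1 v) pp c).symm

-- ===== VERDICT (by name: the statement is the Claim_ definition above) =====
theorem get_params_list_spec : Claim_equal_get_params_list := by
  intro params _
  show get_params_list params = get_params_list_alt params
  simpa [get_params_list, get_params_list_alt] using main_inv params [""]
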